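-- pv_equiv track=rewrite | github.com/VicLambert/qml-quansistor-entropy | src/circuit/families/quansistor.py | leftover_pairs
-- ===== SOURCE A (Python) =====
-- from typing import Any, Iterable, Set, Tuple
--
-- def leftover_pairs(n_qubits: int, used: Set[int], connectivity: str) -> list[tuple[int, int]]:
--     left = [i for i in range(n_qubits) if i not in used]
--     leftover = set(left)
--
--     pairs : list[tuple[int, int]] = []
--     used : set[int] = set()
--
--     for i in range(n_qubits - 1):
--         a, b = i, i + 1
--         if a in leftover and b in leftover and a not in used and b not in used:
--             pairs.append((a, b))
--             used.update((a, b))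
--     if connectivity in ("loop", "ring"):
--         a, b = n_qubits - 1, 0
--         if a in leftover and b in leftover and a not in used and b not in used:
--             pairs.append((a, b))
--             used.update((a, b))
--     return pairs
-- ===== SOURCE B (Python) =====
-- def leftover_pairs(n_qubits, used, connectivity):
--     # collect maximal runs [s, e) of contiguous leftover indices
--     runs = []
--     i = 0
--     while i < n_qubits:
--         if i in used:
--             i += 1
--         else:
--             s = i
--             while i < n_qubits and i not in used:
--                 i += 1
--             runs.append((s, i))
--     # pair adjacent elements within each run
--     pairs = [(j, j + 1) for s, e in runs for j in range(s, e - 1, 2)]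
--     if connectivity in ("loop", "ring") and runs:
--         fs, fe = runs[0]
--         ls, le = runs[-1]
--         # wrap iff 0 and n-1 are leftover and both stayed unpaired:
--         # 0 unpaired <=> its run is the singleton [0,1); n-1 unpaired <=> last run has odd length
--         if fs == 0 and le == n_qubits and fe == 1 and (le - ls) % 2 == 1:
--             pairs.append((n_qubits - 1, 0))
--     return pairs
-- ===== Notes on version B (the rewrite author's own statement) =====
-- stated objective: alternative
-- what changed: B replaces A's leftover-set plus greedy scan with a shadow used-set by a single pass that groups contiguous unused indices into maximal runs, pairs adjacent elements inside each run, and decides the ring wrap from the first/last run's boundaries and length parity alone.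
import Mathlib
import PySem

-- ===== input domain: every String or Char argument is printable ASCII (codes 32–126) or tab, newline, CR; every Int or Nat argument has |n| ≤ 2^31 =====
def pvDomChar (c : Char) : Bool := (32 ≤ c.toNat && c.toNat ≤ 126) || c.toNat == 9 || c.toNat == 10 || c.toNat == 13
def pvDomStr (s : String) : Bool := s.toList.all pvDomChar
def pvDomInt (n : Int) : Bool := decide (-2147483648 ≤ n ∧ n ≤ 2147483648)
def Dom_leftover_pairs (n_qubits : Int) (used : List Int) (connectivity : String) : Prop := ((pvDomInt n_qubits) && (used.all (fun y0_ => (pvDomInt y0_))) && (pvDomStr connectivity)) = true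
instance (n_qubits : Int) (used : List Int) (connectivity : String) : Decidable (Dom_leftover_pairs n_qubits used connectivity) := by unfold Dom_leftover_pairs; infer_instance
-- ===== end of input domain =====

-- B pairs adjacent leftover qubits by grouping them into maximal contiguous runs in one pass
-- and decides the ring wrap from the first/last run's boundaries and length parity (alternative
-- decomposition, same cost).

-- ===== PORT A =====
-- one iteration of A's for-loop: state is (pairs, shadow used-set)
def lpStep (leftover : PySem.Set Int) (st : List (Int × Int) × PySem.Set Int) (i : Int) :
    List (Int × Int) × PySem.Set Int :=
  if PySem.Set.contains leftover i && PySem.Set.contains leftover (i + 1)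
      && !(PySem.Set.contains st.2 i) && !(PySem.Set.contains st.2 (i + 1)) then
    (st.1 ++ [(i, i + 1)], PySem.Set.add (PySem.Set.add st.2 i) (i + 1))
  else st

def leftover_pairs (n_qubits : Int) (used : List Int) (connectivity : String) : List (Int × Int) :=
  let left := (PySem.List.pyRange 0 n_qubits 1).filter (fun i => !(used.contains i))
  let leftover := PySem.Set.ofList left
  let res := (PySem.List.pyRange 0 (n_qubits - 1) 1).foldl (lpStep leftover)
      ([], (PySem.Set.empty : PySem.Set Int))
  if connectivity == "loop" || connectivity == "ring" then
    if PySem.Set.contains leftover (n_qubits - 1) && PySem.Set.contains leftover 0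
        && !(PySem.Set.contains res.2 (n_qubits - 1)) && !(PySem.Set.contains res.2 0) then
      res.1 ++ [(n_qubits - 1, 0)]
    else res.1
  else res.1

-- ===== PORT B =====
-- inner while-loop of Source B: advance i while it is a leftover index (fuel = remaining distance)
def runEnd (used : List Int) (n : Int) (i : Int) : Nat → Int
  | 0 => i
  | fuel + 1 => if i < n ∧ used.contains i = false then runEnd used n (i + 1) fuel else i

-- outer while-loop of Source B: collect the maximal runs [s, e) of contiguous leftover indices
def runsFrom (used : List Int) (n : Int) (i : Int) : Nat → List (Int × Int)
  | 0 => []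
  | fuel + 1 =>
    if i < n then
      if used.contains i = true then runsFrom used n (i + 1) fuel
      else (i, runEnd used n i (fuel + 1)) :: runsFrom used n (runEnd used n i (fuel + 1)) fuel
    else []

def leftover_pairs_alt (n_qubits : Int) (used : List Int) (connectivity : String) : List (Int × Int) :=
  let runs := runsFrom used n_qubits 0 n_qubits.toNat
  let pairs := runs.flatMap (fun se => (PySem.List.pyRange se.1 (se.2 - 1) 2).map (fun j => (j, j + 1)))
  if (connectivity == "loop" || connectivity == "ring") && !runs.isEmpty then
    -- runs[0] / runs[-1], read under the guard 'runs' (nonempty, so the defaults are dead)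
    let fsfe := runs.head?.getD (0, 0)
    let lsle := runs.getLast?.getD (0, 0)
    if fsfe.1 == 0 && lsle.2 == n_qubits && fsfe.2 == 1 && PySem.Int.mod (lsle.2 - lsle.1) 2 == 1 then
      pairs ++ [(n_qubits - 1, 0)]
    else pairs
  else pairs

-- ===== PRECONDITION & SPEC =====
def Spec_leftover_pairs (n_qubits : Int) (used : List Int) (connectivity : String) (out : List (Int × Int)) : Prop := out = leftover_pairs_alt n_qubits used connectivity
instance (n_qubits : Int) (used : List Int) (connectivity : String) (out : List (Int × Int)) : Decidable (Spec_leftover_pairs n_qubits used connectivity out) := by unfold Spec_leftover_pairs; infer_instance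

-- ===== CLAIM (what is proved, stated in full; the proofs are below) =====
def Claim_equal_leftover_pairs : Prop := ∀ (n_qubits : Int) (used : List Int) (connectivity : String), Dom_leftover_pairs n_qubits used connectivity → Spec_leftover_pairs n_qubits used connectivity (leftover_pairs n_qubits used connectivity)

-- ===== LEMMAS AND PROOFS =====

-- the common reference recursion both programs are reduced to: scan the leftover-flags,
-- pair two adjacent `true`s unless the left one was just paired (flag p); the returned Bool
-- says whether the element the scan stopped on is paired
def gPair : List Bool → Int → Bool → List (Int × Int) × Bool
  | [], _, p => ([], p)
  | [_], _, p => ([], p)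
  | b :: c :: rest, i, p =>
    if b && c && !p then
      ((i, i + 1) :: (gPair (c :: rest) (i + 1) true).1, (gPair (c :: rest) (i + 1) true).2)
    else gPair (c :: rest) (i + 1) false

def endsOf (ps : List (Int × Int)) : List Int := ps.flatMap (fun p => [p.1, p.2])

def Lb (n : Int) (used : List Int) (x : Int) : Bool :=
  decide (0 ≤ x) && decide (x < n) && !(used.contains x)

def bsOf (L : Int → Bool) (n i : Int) : List Bool := (PySem.List.pyRange i n 1).map L

def flatPairs (rs : List (Int × Int)) : List (Int × Int) :=
  rs.flatMap (fun se => (PySem.List.pyRange se.1 (se.2 - 1) 2).map (fun j => (j, j + 1)))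

def lastFlag (n : Int) (rs : List (Int × Int)) : Bool :=
  match rs.getLast? with
  | none => false
  | some q => decide (q.2 = n) && decide ((q.2 - q.1) % 2 = 0)

def lastTouch (n : Int) (rs : List (Int × Int)) : Bool :=
  match rs.getLast? with
  | none => false
  | some q => decide (q.2 = n)

-- small equation/unfolding lemmas (kept explicit so rewriting stays under control)

lemma gPair_nil (i : Int) (p : Bool) : gPair [] i p = ([], p) := rfl

lemma gPair_one (b : Bool) (i : Int) (p : Bool) : gPair [b] i p = ([], p) := rfl

lemma gPair_two (b c : Bool) (r : List Bool) (i : Int) (p : Bool) :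
    gPair (b :: c :: r) i p =
      if b && c && !p then
        ((i, i + 1) :: (gPair (c :: r) (i + 1) true).1, (gPair (c :: r) (i + 1) true).2)
      else gPair (c :: r) (i + 1) false := rfl

lemma gPair_two_pos {b c : Bool} (r : List Bool) (i : Int) {p : Bool}
    (h : (b && c && !p) = true) :
    gPair (b :: c :: r) i p =
      ((i, i + 1) :: (gPair (c :: r) (i + 1) true).1, (gPair (c :: r) (i + 1) true).2) := by
  rw [gPair_two, if_pos h]

lemma gPair_two_neg {b c : Bool} (r : List Bool) (i : Int) {p : Bool}
    (h : ¬ (b && c && !p) = true) :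
    gPair (b :: c :: r) i p = gPair (c :: r) (i + 1) false := by
  rw [gPair_two, if_neg h]

lemma endsOf_nil : endsOf [] = [] := rfl

lemma endsOf_cons (q : Int × Int) (ps : List (Int × Int)) :
    endsOf (q :: ps) = q.1 :: q.2 :: endsOf ps := rfl

lemma lastFlag_nil (n : Int) : lastFlag n [] = false := rfl

lemma lastFlag_some {n : Int} {rs : List (Int × Int)} {q : Int × Int}
    (h : rs.getLast? = some q) :
    lastFlag n rs = (decide (q.2 = n) && decide ((q.2 - q.1) % 2 = 0)) := by
  simp [lastFlag, h]

lemma lastTouch_nil (n : Int) : lastTouch n [] = false := rfl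

lemma lastTouch_some {n : Int} {rs : List (Int × Int)} {q : Int × Int}
    (h : rs.getLast? = some q) : lastTouch n rs = decide (q.2 = n) := by
  simp [lastTouch, h]

lemma runEnd_zero (used : List Int) (n i : Int) : runEnd used n i 0 = i := rfl

lemma runEnd_succ (used : List Int) (n i : Int) (f : Nat) :
    runEnd used n i (f + 1)
      = if i < n ∧ used.contains i = false then runEnd used n (i + 1) f else i := rfl

lemma runsFrom_succ (used : List Int) (n i : Int) (f : Nat) :
    runsFrom used n i (f + 1)
      = if i < n then
          if used.contains i = true then runsFrom used n (i + 1) f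
          else (i, runEnd used n i (f + 1)) :: runsFrom used n (runEnd used n i (f + 1)) f
        else [] := rfl

lemma band4_fst : ∀ a b c d : Bool, (a && b && c && d) = true → (a && b && c) = true := by
  decide

lemma band4_of : ∀ a b c d : Bool, (a && b && c) = true → d = true → (a && b && c && d) = true := by
  decide

lemma pyRange_two_nil {a b : Int} (h : b ≤ a) : PySem.List.pyRange a b 2 = [] := by
  rw [PySem.List.pyRange_of_pos a b (by norm_num)]
  simp [not_lt.mpr h]

lemma pyRange_two_cons {a b : Int} (h : a < b) :
    PySem.List.pyRange a b 2 = a :: PySem.List.pyRange (a + 2) b 2 := by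
  rw [PySem.List.pyRange_of_pos a b (by norm_num), PySem.List.pyRange_of_pos (a + 2) b (by norm_num)]
  by_cases h2 : a + 2 < b
  · rw [if_pos h, if_pos h2]
    have hc : ((b - a + 2 - 1) / 2).toNat = ((b - (a + 2) + 2 - 1) / 2).toNat + 1 := by omega
    rw [hc, List.range_succ_eq_map]
    simp only [List.map_cons, List.map_map]
    congr 1
    · simp
    · apply List.map_congr_left
      intro k _
      simp [Function.comp]
      push_cast
      ring
  · rw [if_pos h, if_neg h2]
    have hc : ((b - a + 2 - 1) / 2).toNat = 1 := by omega
    rw [hc]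
    simp

lemma bsOf_cons (L : Int → Bool) {n i : Int} (h : i < n) :
    bsOf L n i = L i :: bsOf L n (i + 1) := by
  unfold bsOf
  rw [PySem.List.pyRange_one_cons h]
  simp

lemma bsOf_nil (L : Int → Bool) {n i : Int} (h : n ≤ i) : bsOf L n i = [] := by
  unfold bsOf
  rw [PySem.List.pyRange_one_eq_nil h]
  simp

lemma bsOf_length (L : Int → Bool) (n i : Int) : (bsOf L n i).length = (n - i).toNat := by
  simp [bsOf, PySem.List.length_pyRange_one]

lemma gPair_short (l : List Bool) (i : Int) (p : Bool) (h : l.length ≤ 1) :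
    gPair l i p = ([], p) := by
  match l with
  | [] => rfl
  | [b] => rfl
  | b :: c :: r => simp at h

lemma endsOf_gPair_bound : ∀ (l : List Bool) (i : Int) (p : Bool) (x : Int),
    x ∈ endsOf (gPair l i p).1 → i ≤ x ∧ x < i + l.length := by
  intro l
  induction l with
  | nil => intro i p x hx; rw [gPair_nil] at hx; simp [endsOf_nil] at hx
  | cons b t ih =>
    intro i p x hx
    cases t with
    | nil => rw [gPair_one] at hx; simp [endsOf_nil] at hx
    | cons c r =>
      by_cases hc : (b && c && !p) = true
      · rw [gPair_two_pos r i hc] at hx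
        rw [show ((i, i + 1) :: (gPair (c :: r) (i + 1) true).1, (gPair (c :: r) (i + 1) true).2).1
            = (i, i + 1) :: (gPair (c :: r) (i + 1) true).1 from rfl] at hx
        rw [endsOf_cons] at hx
        simp only [List.mem_cons] at hx
        rcases hx with rfl | hx
        · simp only [List.length_cons]
          omega
        rcases hx with rfl | hx
        · simp only [List.length_cons]
          omega
        · have := ih (i + 1) true x hx
          simp only [List.length_cons] at this ⊢
          omega
      · rw [gPair_two_neg r i hc] at hx
        have := ih (i + 1) false x hx
        simp only [List.length_cons] at this ⊢
        omega

lemma gPair_first (b c : Bool) (r : List Bool) (i : Int) (p : Bool) :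
    i ∈ endsOf (gPair (b :: c :: r) i p).1 ↔ (b && c && !p) = true := by
  by_cases hc : (b && c && !p) = true
  · rw [gPair_two_pos r i hc]
    simp only [hc, iff_true]
    rw [endsOf_cons]
    simp
  · rw [gPair_two_neg r i hc]
    constructor
    · intro hx
      have := endsOf_gPair_bound (c :: r) (i + 1) false i hx
      exact absurd this.1 (by omega)
    · intro h
      exact absurd h hc

lemma gPair_last : ∀ (l : List Bool) (i : Int) (p : Bool), l ≠ [] →
    ((gPair l i p).2 = true ↔
      ((i + (l.length : Int) - 1) ∈ endsOf (gPair l i p).1 ∨ (p = true ∧ l.length = 1))) := by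
  intro l
  induction l with
  | nil => intro i p h; exact absurd rfl h
  | cons b t ih =>
    intro i p _
    cases t with
    | nil =>
      rw [gPair_one]
      simp [endsOf_nil]
    | cons c r =>
      by_cases hc : (b && c && !p) = true
      · rw [gPair_two_pos r i hc]
        rw [show ((i, i + 1) :: (gPair (c :: r) (i + 1) true).1, (gPair (c :: r) (i + 1) true).2).2
            = (gPair (c :: r) (i + 1) true).2 from rfl]
        rw [show ((i, i + 1) :: (gPair (c :: r) (i + 1) true).1, (gPair (c :: r) (i + 1) true).2).1
            = (i, i + 1) :: (gPair (c :: r) (i + 1) true).1 from rfl]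
        rw [endsOf_cons]
        simp only [List.mem_cons]
        cases r with
        | nil =>
          rw [show gPair [c] (i + 1) true = ([], true) from rfl]
          simp only [endsOf_nil, List.not_mem_nil, or_false, List.length_cons,
            List.length_nil]
          constructor
          · intro _
            left
            right
            push_cast
            ring
          · intro _
            trivial
        | cons d r' =>
          have hih := ih (i + 1) true (by simp)
          have hlen1 : ¬ ((c :: d :: r').length = 1) := by simp
          simp only [hlen1, and_false, or_false] at hih
          rw [hih]
          have hidx : i + ((b :: c :: d :: r').length : Int) - 1
              = (i + 1) + ((c :: d :: r').length : Int) - 1 := by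
            simp only [List.length_cons]
            push_cast
            ring
          have hbig : ¬ (i + ((b :: c :: d :: r').length : Int) - 1 = i)
              ∧ ¬ (i + ((b :: c :: d :: r').length : Int) - 1 = i + 1) := by
            simp only [List.length_cons]
            push_cast
            constructor <;> intro h <;> omega
          constructor
          · intro h
            left
            right
            right
            rw [hidx]
            exact h
          · intro h
            rcases h with (h | h | h) | h
            · exact absurd h hbig.1
            · exact absurd h hbig.2
            · rw [← hidx]
              exact h
            · exact absurd h.2 (by simp)
      · rw [gPair_two_neg r i hc]
        have hih := ih (i + 1) false (by simp)
        simp only [Bool.false_eq_true, false_and, or_false] at hih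
        rw [hih]
        have hidx : i + ((b :: c :: r).length : Int) - 1
            = (i + 1) + ((c :: r).length : Int) - 1 := by
          simp only [List.length_cons]
          push_cast
          ring
        have hlen : ¬ ((b :: c :: r).length = 1) := by simp
        simp only [hlen, and_false, or_false]
        rw [hidx]

lemma run_block : ∀ (k : Nat) (i : Int) (rest : List Bool),
    (rest = [] ∨ ∃ r', rest = false :: r') →
    gPair (List.replicate k true ++ rest) i false
      = ((PySem.List.pyRange i (i + k - 1) 2).map (fun j => (j, j + 1)) ++ (gPair rest (i + k) false).1,
         if rest.isEmpty then decide (k % 2 = 0 ∧ k ≠ 0) else (gPair rest (i + k) false).2) := by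
  intro k
  induction k using Nat.strong_induction_on with
  | _ k ih =>
    rcases k with _ | k
    · intro i rest hrest
      have h0 : PySem.List.pyRange i (i + ((0 : Nat) : Int) - 1) 2 = [] :=
        pyRange_two_nil (by omega)
      rcases hrest with h | ⟨r', h⟩ <;> subst h
      · rw [h0]
        simp [gPair_nil]
      · rw [h0]
        simp
    rcases k with _ | k
    · intro i rest hrest
      have h0 : PySem.List.pyRange i (i + ((1 : Nat) : Int) - 1) 2 = [] :=
        pyRange_two_nil (by omega)
      rcases hrest with h | ⟨r', h⟩ <;> subst h
      · rw [h0]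
        simp only [List.replicate_succ, List.replicate_zero, List.append_nil]
        rw [gPair_one, gPair_nil]
        simp
      · rw [h0]
        simp only [List.replicate_succ, List.replicate_zero, List.nil_append,
          List.cons_append]
        rw [gPair_two_neg (r' ) i (by simp)]
        simp
    · intro i rest hrest
      by_cases hM : List.replicate k true ++ rest = []
      · rw [List.append_eq_nil_iff] at hM
        have hk : k = 0 := by
          have := hM.1
          simpa using this
        subst hk
        rw [hM.2]
        have h1 : PySem.List.pyRange i (i + (((0 : Nat) + 1 + 1 : Nat) : Int) - 1) 2 = [i] := by
          rw [show i + (((0 : Nat) + 1 + 1 : Nat) : Int) - 1 = i + 1 by push_cast; ring]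
          rw [pyRange_two_cons (by omega), pyRange_two_nil (by omega)]
        simp only [List.replicate_succ, List.replicate_zero, List.append_nil]
        rw [gPair_two_pos [] i (by simp)]
        rw [gPair_one, gPair_nil, h1]
        simp
      · obtain ⟨m, M', hMcons⟩ := List.exists_cons_of_ne_nil hM
        have hshape : List.replicate (k + 1 + 1) true ++ rest
            = true :: true :: (List.replicate k true ++ rest) := by
          simp [List.replicate_succ]
        have hstep : gPair (List.replicate (k + 1 + 1) true ++ rest) i false
            = ((i, i + 1) :: (gPair (List.replicate k true ++ rest) (i + 2) false).1,
               (gPair (List.replicate k true ++ rest) (i + 2) false).2) := by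
          rw [hshape, hMcons]
          rw [gPair_two_pos (m :: M') i (by simp)]
          rw [gPair_two_neg M' (i + 1) (by simp)]
          rw [show i + 1 + 1 = i + 2 by ring]
        rw [hstep, ih k (by omega) (i + 2) rest hrest]
        have hrange : PySem.List.pyRange i (i + ((k + 1 + 1 : Nat) : Int) - 1) 2
            = i :: PySem.List.pyRange (i + 2) ((i + 2) + (k : Int) - 1) 2 := by
          rw [pyRange_two_cons (by push_cast; omega)]
          congr 2
          push_cast
          ring
        rw [Prod.mk.injEq]
        constructor
        · rw [hrange]
          simp only [List.map_cons, List.cons_append]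
          rw [show i + ((k + 1 + 1 : Nat) : Int) = (i + 2) + (k : Int) by push_cast; ring]
        · rw [show i + ((k + 1 + 1 : Nat) : Int) = (i + 2) + (k : Int) by push_cast; ring]
          rcases hrest with h | ⟨r', h⟩ <;> subst h
          · simp only [List.isEmpty_nil, if_true]
            have hk0 : k ≠ 0 := by
              intro h
              subst h
              simp at hM
            rw [decide_eq_decide]
            omega
          · simp

-- ----- A side: the fold with the shadow used-set computes gPair -----

lemma contains_false_iff (s : PySem.Set Int) (x : Int) :
    PySem.Set.contains s x = false ↔ ¬ x ∈ s := by
  rw [← PySem.Set.contains_iff]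
  cases h : PySem.Set.contains s x <;> simp

lemma contains_add2 (s : PySem.Set Int) (i x : Int) :
    PySem.Set.contains (PySem.Set.add (PySem.Set.add s i) (i + 1)) x = true
      ↔ (PySem.Set.contains s x = true ∨ x = i ∨ x = i + 1) := by
  rw [PySem.Set.contains_iff, PySem.Set.mem_add, PySem.Set.mem_add, ← PySem.Set.contains_iff,
    or_assoc]

lemma foldA (lv : PySem.Set Int) (n : Int) :
    ∀ (k : Nat) (i : Int), (n - 1 - i).toNat ≤ k →
    ∀ (pairs0 : List (Int × Int)) (s : PySem.Set Int),
    (∀ x, i < x → PySem.Set.contains s x = false) →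
    ((PySem.List.pyRange i (n - 1) 1).foldl (lpStep lv) (pairs0, s)).1
        = pairs0 ++ (gPair (bsOf (fun x => PySem.Set.contains lv x) n i) i (PySem.Set.contains s i)).1
      ∧ ∀ x, (PySem.Set.contains ((PySem.List.pyRange i (n - 1) 1).foldl (lpStep lv) (pairs0, s)).2 x = true
          ↔ (PySem.Set.contains s x = true
              ∨ x ∈ endsOf (gPair (bsOf (fun x => PySem.Set.contains lv x) n i) i (PySem.Set.contains s i)).1)) := by
  intro k
  induction k with
  | zero =>
    intro i hk pairs0 s hfresh
    rw [PySem.List.pyRange_one_eq_nil (by omega)]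
    rw [gPair_short _ _ _ (by rw [bsOf_length]; omega)]
    simp [endsOf_nil]
  | succ k ihk =>
    intro i hk pairs0 s hfresh
    by_cases hlt : i < n - 1
    case neg =>
      rw [PySem.List.pyRange_one_eq_nil (by omega)]
      rw [gPair_short _ _ _ (by rw [bsOf_length]; omega)]
      simp [endsOf_nil]
    case pos =>
      rw [PySem.List.pyRange_one_cons hlt]
      simp only [List.foldl_cons]
      have hfr1 : PySem.Set.contains s (i + 1) = false := hfresh _ (by omega)
      have hbs : bsOf (fun x => PySem.Set.contains lv x) n i
          = PySem.Set.contains lv i :: PySem.Set.contains lv (i + 1)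
            :: bsOf (fun x => PySem.Set.contains lv x) n (i + 1 + 1) := by
        rw [bsOf_cons _ (by omega), bsOf_cons _ (by omega)]
      by_cases hcond : (PySem.Set.contains lv i && PySem.Set.contains lv (i + 1)
          && !(PySem.Set.contains s i)) = true
      case pos =>
        have hstep : lpStep lv (pairs0, s) i
            = (pairs0 ++ [(i, i + 1)], PySem.Set.add (PySem.Set.add s i) (i + 1)) := by
          unfold lpStep
          rw [if_pos]
          exact band4_of _ _ _ _ hcond (by rw [hfr1]; rfl)
        rw [hstep]
        have hfresh' : ∀ x, i + 1 < x →
            PySem.Set.contains (PySem.Set.add (PySem.Set.add s i) (i + 1)) x = false := by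
          intro x hx
          rw [contains_false_iff]
          intro hmem
          have := (contains_add2 s i x).mp (by rw [PySem.Set.contains_iff]; exact hmem)
          rcases this with h | h | h
          · rw [hfresh x (by omega)] at h
            exact absurd h (by simp)
          · omega
          · omega
        have hprev : PySem.Set.contains (PySem.Set.add (PySem.Set.add s i) (i + 1)) (i + 1) = true := by
          rw [PySem.Set.contains_iff]
          exact (PySem.Set.mem_add _ _ _).mpr (Or.inr rfl)
        obtain ⟨ih1, ih2⟩ := ihk (i + 1) (by omega) (pairs0 ++ [(i, i + 1)])
          (PySem.Set.add (PySem.Set.add s i) (i + 1)) hfresh'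
        rw [hprev] at ih1 ih2
        have hbs1 : bsOf (fun x => PySem.Set.contains lv x) n (i + 1)
            = PySem.Set.contains lv (i + 1)
              :: bsOf (fun x => PySem.Set.contains lv x) n (i + 1 + 1) := by
          rw [bsOf_cons _ (by omega)]
        have hg : gPair (bsOf (fun x => PySem.Set.contains lv x) n i) i (PySem.Set.contains s i)
            = ((i, i + 1) :: (gPair (bsOf (fun x => PySem.Set.contains lv x) n (i + 1)) (i + 1) true).1,
               (gPair (bsOf (fun x => PySem.Set.contains lv x) n (i + 1)) (i + 1) true).2) := by
          rw [hbs, gPair_two_pos _ i hcond, ← hbs1]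
        constructor
        · rw [ih1, hg]
          simp
        · intro x
          rw [ih2 x, hg]
          rw [show ((i, i + 1) :: (gPair (bsOf (fun x => PySem.Set.contains lv x) n (i + 1)) (i + 1) true).1,
              (gPair (bsOf (fun x => PySem.Set.contains lv x) n (i + 1)) (i + 1) true).2).1
              = (i, i + 1) :: (gPair (bsOf (fun x => PySem.Set.contains lv x) n (i + 1)) (i + 1) true).1
              from rfl]
          rw [endsOf_cons, contains_add2]
          simp only [List.mem_cons]
          tauto
      case neg =>
        have hstep : lpStep lv (pairs0, s) i = (pairs0, s) := by
          unfold lpStep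
          rw [if_neg]
          intro h
          exact hcond (band4_fst _ _ _ _ h)
        rw [hstep]
        obtain ⟨ih1, ih2⟩ := ihk (i + 1) (by omega) pairs0 s (fun x hx => hfresh x (by omega))
        rw [hfr1] at ih1 ih2
        have hg : gPair (bsOf (fun x => PySem.Set.contains lv x) n i) i (PySem.Set.contains s i)
            = gPair (bsOf (fun x => PySem.Set.contains lv x) n (i + 1)) (i + 1) false := by
          rw [hbs, gPair_two_neg _ i hcond, bsOf_cons _ (show i + 1 < n by omega)]
        rw [hg]
        exact ⟨ih1, ih2⟩

-- ----- B side: runs compute gPair too -----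

lemma runEnd_ge (used : List Int) (n : Int) :
    ∀ (fuel : Nat) (i : Int), i ≤ runEnd used n i fuel := by
  intro fuel
  induction fuel with
  | zero => intro i; exact le_refl i
  | succ f ih =>
    intro i
    rw [runEnd_succ]
    split
    · exact le_trans (by omega) (ih (i + 1))
    · exact le_refl i

lemma runEnd_spec (used : List Int) (n : Int) :
    ∀ (fuel : Nat) (i : Int), (n - i).toNat ≤ fuel →
      ((i ≤ n → runEnd used n i fuel ≤ n)
        ∧ (∀ j, i ≤ j → j < runEnd used n i fuel → (j < n ∧ used.contains j = false))
        ∧ (runEnd used n i fuel < n → used.contains (runEnd used n i fuel) = true)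
        ∧ ((i < n ∧ used.contains i = false) → i < runEnd used n i fuel)) := by
  intro fuel
  induction fuel with
  | zero =>
    intro i hk
    have hni : n ≤ i := by omega
    refine ⟨fun h => by rw [runEnd_zero]; omega, fun j h1 h2 => ?_, fun h => ?_, fun h => by omega⟩
    · rw [runEnd_zero] at h2
      omega
    · exfalso
      rw [runEnd_zero] at h
      omega
  | succ f ih =>
    intro i hk
    by_cases h : i < n ∧ used.contains i = false
    · rw [runEnd_succ, if_pos h]
      obtain ⟨ih1, ih2, ih3, ih4⟩ := ih (i + 1) (by omega)
      refine ⟨fun _ => ih1 (by omega), ?_, ih3, fun _ => ?_⟩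
      · intro j hj1 hj2
        rcases eq_or_lt_of_le hj1 with rfl | hj1'
        · exact h
        · exact ih2 j (by omega) hj2
      · calc i < i + 1 := by omega
          _ ≤ _ := runEnd_ge used n f (i + 1)
    · rw [runEnd_succ, if_neg h]
      refine ⟨fun h' => by omega, fun j h1 h2 => by omega, fun hlt => ?_, fun h' => absurd h' h⟩
      rcases Decidable.em (used.contains i = true) with h' | h'
      · exact h'
      · exact absurd ⟨hlt, by simpa using h'⟩ h

lemma runsFrom_ge (used : List Int) (n : Int) (fuel : Nat) (i : Int) (h : n ≤ i) :
    runsFrom used n i fuel = [] := by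
  cases fuel with
  | zero => rfl
  | succ f => rw [runsFrom_succ, if_neg (by omega)]

lemma runsFrom_start (used : List Int) (n : Int) :
    ∀ (fuel : Nat) (i : Int) (se : Int × Int), se ∈ runsFrom used n i fuel → i ≤ se.1 := by
  intro fuel
  induction fuel with
  | zero => intro i se h; simp [runsFrom] at h
  | succ f ih =>
    intro i se h
    rw [runsFrom_succ] at h
    split at h
    · split at h
      · exact le_trans (by omega) (ih (i + 1) se h)
      · simp only [List.mem_cons] at h
        rcases h with rfl | h
        · exact le_refl i
        · exact le_trans (runEnd_ge used n (f + 1) i) (ih _ se h)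
    · simp at h

lemma runsFrom_lt (used : List Int) (n : Int) :
    ∀ (fuel : Nat) (i : Int), (n - i).toNat ≤ fuel → 0 ≤ i →
      ∀ se, se ∈ runsFrom used n i fuel → se.1 < se.2 := by
  intro fuel
  induction fuel with
  | zero => intro i _ _ se h; simp [runsFrom] at h
  | succ f ih =>
    intro i hk hi se h
    rw [runsFrom_succ] at h
    split at h
    case isTrue hin =>
      split at h
      case isTrue hc => exact ih (i + 1) (by omega) (by omega) se h
      case isFalse hc =>
        have hcf : used.contains i = false := by simpa using hc
        have hie : i < runEnd used n i (f + 1) :=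
          (runEnd_spec used n (f + 1) i (by omega)).2.2.2 ⟨hin, hcf⟩
        have hen : runEnd used n i (f + 1) ≤ n :=
          (runEnd_spec used n (f + 1) i (by omega)).1 (by omega)
        simp only [List.mem_cons] at h
        rcases h with rfl | h
        · exact hie
        · exact ih (runEnd used n i (f + 1)) (by omega) (by omega) se h
    case isFalse => simp at h

lemma mem_getLast' : ∀ (l : List (Int × Int)) (q : Int × Int), l.getLast? = some q → q ∈ l := by
  intro l
  induction l with
  | nil => intro q h; simp at h
  | cons a t ih =>
    intro q h
    cases t with
    | nil =>
      simp at h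
      simp [h]
    | cons b t' =>
      rw [List.getLast?_cons_cons] at h
      exact List.mem_cons_of_mem a (ih q h)

lemma runsB (n : Int) (used : List Int) :
    ∀ (fuel : Nat) (i : Int), (n - i).toNat ≤ fuel → 0 ≤ i → i ≤ n →
      ((gPair (bsOf (Lb n used) n i) i false).1 = flatPairs (runsFrom used n i fuel)
        ∧ (gPair (bsOf (Lb n used) n i) i false).2 = lastFlag n (runsFrom used n i fuel)
        ∧ (i < n → Lb n used (n - 1) = lastTouch n (runsFrom used n i fuel))) := by
  intro fuel
  induction fuel with
  | zero =>
    intro i hk hi hin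
    have hin' : i = n := by omega
    subst hin'
    rw [bsOf_nil _ (le_refl _), gPair_nil]
    exact ⟨rfl, rfl, fun h => absurd h (lt_irrefl _)⟩
  | succ f ih =>
    intro i hk hi hin
    by_cases hlt : i < n
    case neg =>
      rw [bsOf_nil _ (by omega), gPair_nil, runsFrom_ge used n (f + 1) i (by omega)]
      exact ⟨rfl, rfl, fun h => absurd h (by omega)⟩
    case pos =>
      by_cases hc : used.contains i = true
      case pos =>
        have hrs : runsFrom used n i (f + 1) = runsFrom used n (i + 1) f := by
          rw [runsFrom_succ, if_pos hlt, if_pos hc]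
        have hLbi : Lb n used i = false := by
          simp only [Lb, hc, Bool.not_true, Bool.and_false]
        have hbs : bsOf (Lb n used) n i = false :: bsOf (Lb n used) n (i + 1) := by
          rw [bsOf_cons _ hlt, hLbi]
        have hg : gPair (bsOf (Lb n used) n i) i false
            = gPair (bsOf (Lb n used) n (i + 1)) (i + 1) false := by
          rw [hbs]
          rcases hbs1 : bsOf (Lb n used) n (i + 1) with _ | ⟨c, r⟩
          · rw [gPair_one, gPair_nil]
          · exact gPair_two_neg r i (by simp)
        obtain ⟨ih1, ih2, ih3⟩ := ih (i + 1) (by omega) (by omega) (by omega)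
        rw [hrs, hg]
        refine ⟨ih1, ih2, fun _ => ?_⟩
        by_cases hn1 : i + 1 < n
        · exact ih3 hn1
        · rw [runsFrom_ge used n f (i + 1) (by omega), lastTouch_nil]
          rw [show n - 1 = i by omega, hLbi]
      case neg =>
        have hcf : used.contains i = false := by simpa using hc
        have hrs : runsFrom used n i (f + 1)
            = (i, runEnd used n i (f + 1)) :: runsFrom used n (runEnd used n i (f + 1)) f := by
          rw [runsFrom_succ, if_pos hlt, if_neg hc]
        obtain ⟨hs1, hs2, hs3, hs4⟩ := runEnd_spec used n (f + 1) i (by omega)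
        have hie : i < runEnd used n i (f + 1) := hs4 ⟨hlt, hcf⟩
        have hen : runEnd used n i (f + 1) ≤ n := hs1 (by omega)
        have hbsplit : bsOf (Lb n used) n i
            = List.replicate (runEnd used n i (f + 1) - i).toNat true
              ++ bsOf (Lb n used) n (runEnd used n i (f + 1)) := by
          unfold bsOf
          rw [PySem.List.pyRange_one_append i (runEnd used n i (f + 1)) n (by omega) hen,
            List.map_append]
          congr 1
          rw [List.eq_replicate_iff]
          constructor
          · simp [PySem.List.length_pyRange_one]
          · intro b hb
            simp only [List.mem_map] at hb
            obtain ⟨j, hj, rfl⟩ := hb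
            rw [PySem.List.mem_pyRange_one] at hj
            have hjj := hs2 j (by omega) (by omega)
            simp only [Lb, hjj.2, Bool.not_false, Bool.and_true]
            rw [Bool.and_eq_true, decide_eq_true_eq, decide_eq_true_eq]
            omega
        have hrest : bsOf (Lb n used) n (runEnd used n i (f + 1)) = []
            ∨ ∃ r', bsOf (Lb n used) n (runEnd used n i (f + 1)) = false :: r' := by
          rcases eq_or_lt_of_le hen with he | hlt'
          · exact Or.inl (bsOf_nil _ (by omega))
          · right
            refine ⟨bsOf (Lb n used) n (runEnd used n i (f + 1) + 1), ?_⟩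
            rw [bsOf_cons _ hlt']
            rw [show Lb n used (runEnd used n i (f + 1)) = false by
              simp only [Lb, hs3 hlt', Bool.not_true, Bool.and_false]]
        have hik : i + (((runEnd used n i (f + 1) - i).toNat : Nat) : Int)
            = runEnd used n i (f + 1) := by omega
        have hblock := run_block (runEnd used n i (f + 1) - i).toNat i
          (bsOf (Lb n used) n (runEnd used n i (f + 1))) hrest
        rw [hik] at hblock
        obtain ⟨ih1, ih2, ih3⟩ := ih (runEnd used n i (f + 1)) (by omega) (by omega) hen
        rw [hrs, hbsplit, hblock]
        refine ⟨?_, ?_, ?_⟩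
        · rw [show flatPairs ((i, runEnd used n i (f + 1)) :: runsFrom used n (runEnd used n i (f + 1)) f)
              = (PySem.List.pyRange i (runEnd used n i (f + 1) - 1) 2).map (fun j => (j, j + 1))
                ++ flatPairs (runsFrom used n (runEnd used n i (f + 1)) f) from rfl]
          rw [ih1]
        · rcases eq_or_lt_of_le hen with he | hlt'
          · rw [bsOf_nil _ (by omega), runsFrom_ge used n f (runEnd used n i (f + 1)) (by omega)]
            simp only [List.isEmpty_nil, if_true]
            rw [lastFlag_some (q := (i, runEnd used n i (f + 1))) (by simp)]
            have hd1 : decide ((i, runEnd used n i (f + 1)).2 = n) = true := by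
              rw [decide_eq_true_eq]
              omega
            rw [hd1, Bool.true_and, decide_eq_decide]
            omega
          · cases hbsE : bsOf (Lb n used) n (runEnd used n i (f + 1)) with
            | nil =>
              exfalso
              have := bsOf_length (Lb n used) n (runEnd used n i (f + 1))
              rw [hbsE] at this
              simp at this
              omega
            | cons hd tl =>
              simp only [List.isEmpty_cons, if_neg (by simp : ¬ (false = true))]
              rw [hbsE] at ih2
              rw [ih2]
              rcases hrs' : runsFrom used n (runEnd used n i (f + 1)) f with _ | ⟨q, qs⟩
              · rw [lastFlag_nil, lastFlag_some (q := (i, runEnd used n i (f + 1))) (by simp)]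
                have hd0 : decide ((i, runEnd used n i (f + 1)).2 = n) = false := by
                  rw [decide_eq_false_iff_not]
                  omega
                rw [hd0, Bool.false_and]
              · rw [show lastFlag n ((i, runEnd used n i (f + 1)) :: q :: qs) = lastFlag n (q :: qs) by
                  simp [lastFlag, List.getLast?_cons_cons]]
        · intro _
          rcases eq_or_lt_of_le hen with he | hlt'
          · rw [runsFrom_ge used n f (runEnd used n i (f + 1)) (by omega)]
            rw [lastTouch_some (q := (i, runEnd used n i (f + 1))) (by simp)]
            have h1 : Lb n used (n - 1) = true := by
              have hj := hs2 (n - 1) (by omega) (by omega)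
              simp only [Lb, hj.2, Bool.not_false, Bool.and_true]
              rw [Bool.and_eq_true, decide_eq_true_eq, decide_eq_true_eq]
              omega
            rw [h1]
            have hd1 : decide ((i, runEnd used n i (f + 1)).2 = n) = true := by
              rw [decide_eq_true_eq]
              omega
            rw [hd1]
          · rw [ih3 hlt']
            rcases hrs' : runsFrom used n (runEnd used n i (f + 1)) f with _ | ⟨q, qs⟩
            · rw [lastTouch_nil, lastTouch_some (q := (i, runEnd used n i (f + 1))) (by simp)]
              have hd0 : decide ((i, runEnd used n i (f + 1)).2 = n) = false := by
                rw [decide_eq_false_iff_not]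
                omega
              rw [hd0]
            · rw [show lastTouch n ((i, runEnd used n i (f + 1)) :: q :: qs) = lastTouch n (q :: qs) by
                simp [lastTouch, List.getLast?_cons_cons]]

-- ----- bridging the leftover set to Lb -----

lemma contains_leftover (n : Int) (used : List Int) (x : Int) :
    PySem.Set.contains
        (PySem.Set.ofList ((PySem.List.pyRange 0 n 1).filter (fun i => !(used.contains i)))) x
      = Lb n used x := by
  rw [Bool.eq_iff_iff]
  rw [PySem.Set.contains_iff, PySem.Set.mem_ofList]
  simp only [List.mem_filter, PySem.List.mem_pyRange_one, Lb, Bool.and_eq_true,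
    decide_eq_true_eq, Bool.not_eq_true']

lemma contains_empty (x : Int) :
    PySem.Set.contains (PySem.Set.empty : PySem.Set Int) x = false := by
  rw [contains_false_iff]
  intro h
  simp [PySem.Set.empty] at h

-- ===== VERDICT (by name: the statement is the Claim_ definition above) =====
theorem leftover_pairs_spec : Claim_equal_leftover_pairs := by
  intro n used conn _hdom
  unfold Spec_leftover_pairs
  by_cases hn : 0 ≤ n
  case neg =>
    have h1 : PySem.List.pyRange 0 n 1 = [] := PySem.List.pyRange_one_eq_nil (by omega)
    have h2 : PySem.List.pyRange 0 (n - 1) 1 = [] := PySem.List.pyRange_one_eq_nil (by omega)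
    have h3 : n.toNat = 0 := by omega
    simp only [leftover_pairs, leftover_pairs_alt, h1, h2, h3, List.filter_nil, List.foldl_nil]
    rw [show runsFrom used n 0 0 = [] from rfl]
    simp [contains_empty]
  case pos =>
    simp only [leftover_pairs, leftover_pairs_alt]
    set lv := PySem.Set.ofList ((PySem.List.pyRange 0 n 1).filter (fun i => !(used.contains i)))
      with hlvdef
    have hlv : ∀ x, PySem.Set.contains lv x = Lb n used x := fun x => by
      rw [hlvdef]; exact contains_leftover n used x
    have hbseq : bsOf (fun x => PySem.Set.contains lv x) n 0 = bsOf (Lb n used) n 0 := by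
      unfold bsOf
      exact List.map_congr_left (fun a _ => hlv a)
    obtain ⟨hA1, hA2⟩ := foldA lv n (n - 1 - 0).toNat 0 (le_refl _) [] PySem.Set.empty
      (fun x _ => contains_empty x)
    rw [contains_empty 0] at hA1 hA2
    rw [hbseq] at hA1 hA2
    obtain ⟨hB1, hB2, hB3⟩ := runsB n used n.toNat 0 (by omega) (le_refl _) hn
    set G := gPair (bsOf (Lb n used) n 0) 0 false with hGdef
    set rs := runsFrom used n 0 n.toNat with hrsdef
    set res := (PySem.List.pyRange 0 (n - 1) 1).foldl (lpStep lv)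
      ([], (PySem.Set.empty : PySem.Set Int)) with hresdef
    have hres1 : res.1 = flatPairs rs := by
      rw [hA1, hB1]
      simp
    have hres2 : ∀ x, PySem.Set.contains res.2 x = decide (x ∈ endsOf G.1) := by
      intro x
      rw [Bool.eq_iff_iff, hA2 x]
      simp [contains_empty]
    by_cases hcn : (conn == "loop" || conn == "ring") = true
    case neg =>
      have hcn' : (conn == "loop" || conn == "ring") = false := by
        cases h : (conn == "loop" || conn == "ring")
        · rfl
        · exact absurd h hcn
      rw [hcn', Bool.false_and]
      rw [if_neg (by simp : ¬ ((false : Bool) = true)),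
        if_neg (by simp : ¬ ((false : Bool) = true))]
      exact hres1
    case pos =>
      rw [hcn, Bool.true_and, if_pos rfl]
      rcases hrs : rs with _ | ⟨⟨fs, fe⟩, rs'⟩
      · rw [show ([] : List (Int × Int)).isEmpty = true from rfl]
        rw [if_neg (by simp : ¬ ((!(true : Bool)) = true))]
        have hLn1 : Lb n used (n - 1) = false := by
          rcases eq_or_lt_of_le hn with h0 | hpos
          · simp only [Lb]
            rw [show decide (0 ≤ n - 1) = false by simp; omega]
            rw [Bool.false_and, Bool.false_and]
          · rw [hB3 hpos, hrs, lastTouch_nil]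
        rw [if_neg ?_]
        · rw [hres1, hrs]
          rfl
        · rw [hlv (n - 1), hLn1]
          simp
      · have hne : rs ≠ [] := by rw [hrs]; simp
        have hnpos : 0 < n := by
          rcases eq_or_lt_of_le hn with h0 | hpos
          · exfalso
            apply hne
            rw [hrsdef, ← h0]
            rfl
          · exact hpos
        rw [hrs] at hB3 hB2 hB1 hres1
        obtain ⟨⟨ls, le⟩, hlast⟩ : ∃ q, ((fs, fe) :: rs').getLast? = some q := by
          exact ⟨((fs, fe) :: rs').getLast (by simp), List.getLast?_eq_some_getLast (by simp)⟩
        have hlmem : ((ls, le) : Int × Int) ∈ (fs, fe) :: rs' := mem_getLast' _ _ hlast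
        have hlslt : ls < le := by
          have hmm : ((ls, le) : Int × Int) ∈ runsFrom used n 0 n.toNat := by
            rw [← hrsdef, hrs]
            exact hlmem
          have := runsFrom_lt used n n.toNat 0 (by omega) (le_refl _) (ls, le) hmm
          simpa using this
        -- bridges between A's wrap condition and the run data
        have hLn1 : (Lb n used (n - 1) = true) ↔ le = n := by
          rw [hB3 hnpos, lastTouch_some hlast]
          simp
        have hflag : (G.2 = true) ↔ (le = n ∧ (le - ls) % 2 = 0) := by
          rw [hB2, lastFlag_some hlast]
          simp
        have hbs_len : ((bsOf (Lb n used) n 0).length : Int) = n := by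
          rw [bsOf_length]
          omega
        have hbs_ne : bsOf (Lb n used) n 0 ≠ [] := by
          intro h
          rw [h] at hbs_len
          simp at hbs_len
          omega
        have hN1 : ((n - 1) ∈ endsOf G.1) ↔ G.2 = true := by
          rw [hGdef]
          have hgl := gPair_last (bsOf (Lb n used) n 0) 0 false hbs_ne
          rw [hbs_len, show (0 : Int) + n - 1 = n - 1 by ring] at hgl
          rw [hgl]
          simp
        have h0ends : (0 ∈ endsOf G.1) ↔ (Lb n used 0 = true ∧ Lb n used 1 = true) := by
          rcases eq_or_lt_of_le (show (1 : Int) ≤ n by omega) with h1 | h2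
          · have hsing : bsOf (Lb n used) n 0 = [Lb n used 0] := by
              rw [bsOf_cons _ (by omega), bsOf_nil _ (by omega)]
            rw [hGdef, hsing, gPair_one]
            simp only [endsOf_nil, List.not_mem_nil, false_iff, not_and]
            intro _
            simp only [Lb]
            rw [show decide ((1 : Int) < n) = false by simp; omega]
            simp
          · have hbs2 : bsOf (Lb n used) n 0
                = Lb n used 0 :: Lb n used 1 :: bsOf (Lb n used) n (0 + 1 + 1) := by
              rw [bsOf_cons _ (by omega), bsOf_cons _ (by omega)]
              norm_num
            rw [hGdef, hbs2, show (0 : Int) + 1 = 1 by ring, gPair_first]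
            simp
        have hfuel : n.toNat = (n.toNat - 1) + 1 := by omega
        by_cases hc0 : used.contains 0 = true
        · -- qubit 0 is used: neither version wraps
          have hLb0 : Lb n used 0 = false := by
            simp only [Lb, hc0, Bool.not_true, Bool.and_false]
          have hfs1 : 1 ≤ fs := by
            have hrw : runsFrom used n 0 ((n.toNat - 1) + 1) = runsFrom used n 1 (n.toNat - 1) := by
              rw [runsFrom_succ, if_pos hnpos, if_pos hc0]
              norm_num
            have hmem0 : ((fs, fe) : Int × Int) ∈ rs := by rw [hrs]; simp
            have hfuel0 : runsFrom used n 0 n.toNat = runsFrom used n 0 ((n.toNat - 1) + 1) := by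
              rw [← hfuel]
            rw [hrsdef, hfuel0, hrw] at hmem0
            exact runsFrom_start used n (n.toNat - 1) 1 (fs, fe) hmem0
          rw [show ((fs, fe) :: rs').isEmpty = false from rfl]
          rw [if_pos (by simp : (!(false : Bool)) = true)]
          rw [show ((fs, fe) :: rs').head? = some (fs, fe) from rfl, hlast]
          simp only [Option.getD_some]
          rw [if_neg ?_, if_neg ?_]
          · exact hres1
          · intro h
            simp only [Bool.and_eq_true, beq_iff_eq] at h
            obtain ⟨⟨⟨h1, -⟩, -⟩, -⟩ := h
            omega
          · rw [hlv 0, hLb0]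
            simp
        · have hc0' : used.contains 0 = false := by simpa using hc0
          have hLb0 : Lb n used 0 = true := by
            simp only [Lb, hc0', Bool.not_false, Bool.and_true]
            simp only [Bool.and_eq_true, decide_eq_true_eq]
            omega
          have hrw : runsFrom used n 0 ((n.toNat - 1) + 1)
              = (0, runEnd used n 0 ((n.toNat - 1) + 1))
                :: runsFrom used n (runEnd used n 0 ((n.toNat - 1) + 1)) (n.toNat - 1) := by
            rw [runsFrom_succ, if_pos hnpos, if_neg (by rw [hc0']; exact Bool.false_ne_true)]
          have hfuel0 : runsFrom used n 0 n.toNat = runsFrom used n 0 ((n.toNat - 1) + 1) := by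
            rw [← hfuel]
          have hrs2 : (fs, fe) :: rs' = (0, runEnd used n 0 ((n.toNat - 1) + 1))
                :: runsFrom used n (runEnd used n 0 ((n.toNat - 1) + 1)) (n.toNat - 1) := by
            rw [← hrs, hrsdef, hfuel0, hrw]
          have hfs0 : fs = 0 ∧ fe = runEnd used n 0 ((n.toNat - 1) + 1) := by
            have h1 : ((fs, fe) : Int × Int) = (0, runEnd used n 0 ((n.toNat - 1) + 1)) := by
              injection hrs2
            exact ⟨congrArg Prod.fst h1, congrArg Prod.snd h1⟩
          obtain ⟨hfs0, hfe⟩ := hfs0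
          obtain ⟨he1, he2, he3, he4⟩ := runEnd_spec used n ((n.toNat - 1) + 1) 0 (by omega)
          have hepos : 0 < runEnd used n 0 ((n.toNat - 1) + 1) := he4 ⟨hnpos, hc0'⟩
          have hfe1 : (fe = 1) ↔ (Lb n used 1 = false) := by
            rw [hfe]
            constructor
            · intro h
              by_cases h1n : 1 < n
              · have hcc := he3 (by omega)
                rw [h] at hcc
                simp only [Lb, hcc, Bool.not_true, Bool.and_false]
              · simp only [Lb]
                rw [show decide ((1 : Int) < n) = false by simp; omega]
                simp
            · intro h
              by_contra hne1
              have hgt : 1 < runEnd used n 0 ((n.toNat - 1) + 1) := by omega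
              have hj := he2 1 (by omega) hgt
              simp only [Lb, hj.2, Bool.not_false, Bool.and_true] at h
              simp only [Bool.and_eq_false_iff, decide_eq_false_iff_not] at h
              rcases h with h | h
              · omega
              · exact h hj.1
          -- the two wrap conditions are equivalent
          have hAiff : (PySem.Set.contains lv (n - 1) && PySem.Set.contains lv 0
              && !(PySem.Set.contains res.2 (n - 1)) && !(PySem.Set.contains res.2 0)) = true
              ↔ (le = n ∧ fe = 1 ∧ (le - ls) % 2 = 1) := by
            rw [hlv, hlv, hres2, hres2, hLb0, Bool.and_true]
            simp only [Bool.and_eq_true, Bool.not_eq_true', decide_eq_false_iff_not]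
            constructor
            · rintro ⟨⟨h1, h2⟩, h3⟩
              have hle : le = n := hLn1.mp h1
              have hnot2 : ¬ G.2 = true := fun h => h2 (hN1.mpr h)
              have hmod : (le - ls) % 2 = 1 := by
                rcases Int.emod_two_eq_zero_or_one (le - ls) with h | h
                · exact absurd (hflag.mpr ⟨hle, h⟩) hnot2
                · exact h
              refine ⟨hle, ?_, hmod⟩
              rw [hfe1]
              by_contra hLb1
              simp only [Bool.not_eq_false] at hLb1
              exact h3 (h0ends.mpr ⟨hLb0, hLb1⟩)
            · rintro ⟨h1, h2, h3⟩
              refine ⟨⟨hLn1.mpr h1, ?_⟩, ?_⟩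
              · intro hmem
                have := hflag.mp (hN1.mp hmem)
                omega
              · intro hmem
                have hb1 := (h0ends.mp hmem).2
                rw [hfe1] at h2
                rw [h2] at hb1
                exact absurd hb1 (by simp)
          rw [show ((fs, fe) :: rs').isEmpty = false from rfl]
          rw [if_pos (by simp : (!(false : Bool)) = true)]
          rw [show ((fs, fe) :: rs').head? = some (fs, fe) from rfl, hlast]
          simp only [Option.getD_some]
          have hBiff : ((fs, fe).1 == 0 && (ls, le).2 == n && (fs, fe).2 == 1
              && PySem.Int.mod ((ls, le).2 - (ls, le).1) 2 == 1) = true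
              ↔ (le = n ∧ fe = 1 ∧ (le - ls) % 2 = 1) := by
            have hmod : PySem.Int.mod (le - ls) 2 = (le - ls) % 2 :=
              PySem.Int.mod_eq_emod_of_pos (by norm_num)
            simp only [Bool.and_eq_true, beq_iff_eq]
            rw [hmod]
            constructor
            · rintro ⟨⟨⟨-, h1⟩, h2⟩, h3⟩
              exact ⟨h1, h2, h3⟩
            · rintro ⟨h1, h2, h3⟩
              exact ⟨⟨⟨hfs0, h1⟩, h2⟩, h3⟩
          by_cases hP : (le = n ∧ fe = 1 ∧ (le - ls) % 2 = 1)
          · rw [if_pos (hAiff.mpr hP), if_pos (hBiff.mpr hP), hres1]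
            rfl
          · rw [if_neg (fun h => hP (hAiff.mp h)), if_neg (fun h => hP (hBiff.mp h)), hres1]
            rfl
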